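-- pv_equiv track=rewrite | github.com/kazamazza/pokerai | ml/features/boards/board_features.py | _rank_multiplicity_flags
-- ===== SOURCE A (Python) =====
-- from typing import List, Dict, Tuple
--
-- def _rank_multiplicity_flags(ranks: List[int]) -> Tuple[int, int, int]:
--     counts: Dict[int, int] = {}
--     for r in ranks:
--         counts[r] = counts.get(r, 0) + 1
--     multiplicities = sorted(counts.values(), reverse=True)
--     paired = 1 if any(c == 2 for c in multiplicities) else 0
--     trips  = 1 if any(c == 3 for c in multiplicities) else 0
--     quads  = 1 if any(c == 4 for c in multiplicities) else 0
--     return paired, trips, quads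
-- ===== SOURCE B (Python) =====
-- from typing import List, Tuple
--
-- def _rank_multiplicity_flags(ranks: List[int]) -> Tuple[int, int, int]:
--     # Sort, then scan runs of equal values; a run of length exactly 2/3/4
--     # sets the corresponding flag.  No dict is built.
--     paired = trips = quads = 0
--
--     def note(run: int) -> None:
--         nonlocal paired, trips, quads
--         if run == 2:
--             paired = 1
--         elif run == 3:
--             trips = 1
--         elif run == 4:
--             quads = 1
--
--     run = 0
--     prev = None
--     for r in sorted(ranks):
--         if prev is not None and r == prev:
--             run += 1
--         else:
--             note(run)
--             run = 1
--             prev = r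
--     note(run)
--     return paired, trips, quads
-- ===== Notes on version B (the rewrite author's own statement) =====
-- stated objective: alternative
-- what changed: Replaces the dict-counting pass plus value scans by sorting the ranks and scanning runs of equal consecutive values, setting each flag when a run of the exact length occurs.
import Mathlib
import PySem

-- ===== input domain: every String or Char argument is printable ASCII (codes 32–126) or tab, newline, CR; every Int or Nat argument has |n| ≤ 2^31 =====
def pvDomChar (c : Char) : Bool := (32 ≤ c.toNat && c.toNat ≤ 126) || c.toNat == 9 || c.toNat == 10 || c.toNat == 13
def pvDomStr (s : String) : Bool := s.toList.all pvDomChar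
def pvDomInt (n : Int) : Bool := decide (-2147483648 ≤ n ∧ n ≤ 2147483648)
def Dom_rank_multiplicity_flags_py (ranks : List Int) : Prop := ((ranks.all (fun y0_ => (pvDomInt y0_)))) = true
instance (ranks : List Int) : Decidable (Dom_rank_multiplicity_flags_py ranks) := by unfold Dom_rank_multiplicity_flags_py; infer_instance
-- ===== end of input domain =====

-- B replaces A's dict-counting + value scans by a sort-then-run-length scan (alternative algorithm, same result).

-- ===== PORT A =====
def rank_multiplicity_flags_py (ranks : List Int) : Int × Int × Int :=
  let counts : PySem.Dict Int Int := ranks.foldl (fun d r => d.insert r (d.getD r 0 + 1)) PySem.Dict.empty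
  let multiplicities := PySem.List.sorted counts.values (fun c => c) true
  let paired : Int := if multiplicities.any (fun c => c == 2) then 1 else 0
  let trips : Int := if multiplicities.any (fun c => c == 3) then 1 else 0
  let quads : Int := if multiplicities.any (fun c => c == 4) then 1 else 0
  (paired, trips, quads)

-- ===== PORT B =====
-- the nested helper `note(run)` of Source B
def pvNote (acc : Int × Int × Int) (run : Int) : Int × Int × Int :=
  if run == 2 then (1, acc.2.1, acc.2.2)
  else if run == 3 then (acc.1, 1, acc.2.2)
  else if run == 4 then (acc.1, acc.2.1, 1)
  else acc

-- one iteration of Source B's for-loop; state = (flags, run, prev)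
def pvStepB (st : (Int × Int × Int) × Int × Option Int) (r : Int) : (Int × Int × Int) × Int × Option Int :=
  match st with
  | (acc, run, prev) =>
    if prev == some r then (acc, run + 1, prev)
    else (pvNote acc run, 1, some r)

def rank_multiplicity_flags_py_alt (ranks : List Int) : Int × Int × Int :=
  let st := (PySem.List.sorted ranks (fun x => x) false).foldl pvStepB ((0, 0, 0), 0, none)
  pvNote st.1 st.2.1

-- ===== PRECONDITION & SPEC =====
def Spec_rank_multiplicity_flags_py (ranks : List Int) (out : Int × Int × Int) : Prop := out = rank_multiplicity_flags_py_alt ranks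
instance (ranks : List Int) (out : Int × Int × Int) : Decidable (Spec_rank_multiplicity_flags_py ranks out) := by unfold Spec_rank_multiplicity_flags_py; infer_instance

-- ===== CLAIM (what is proved, stated in full; the proofs are below) =====
def Claim_equal_rank_multiplicity_flags_py : Prop := ∀ (ranks : List Int), Dom_rank_multiplicity_flags_py ranks → Spec_rank_multiplicity_flags_py ranks (rank_multiplicity_flags_py ranks)

-- ===== LEMMAS AND PROOFS =====

-- the common characterisation: flag k ↔ some value occurs exactly k times
def pvSpec (l : List Int) : Int × Int × Int :=
  (if ∃ v ∈ l, (l.count v : Int) = 2 then 1 else 0,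
   if ∃ v ∈ l, (l.count v : Int) = 3 then 1 else 0,
   if ∃ v ∈ l, (l.count v : Int) = 4 then 1 else 0)

theorem pvNote_eq (acc : Int × Int × Int) (run : Int) :
    pvNote acc run =
      (if run = 2 then 1 else acc.1, if run = 3 then 1 else acc.2.1, if run = 4 then 1 else acc.2.2) := by
  rcases acc with ⟨p, t3, q⟩
  unfold pvNote
  split_ifs <;> simp_all

theorem exists_count_cons (x : Int) (t : List Int) (k : Int) :
    (∃ v ∈ x :: t, (((x :: t).count v : Int) = k)) ↔
      (1 + (t.count x : Int) = k ∨ ∃ y ∈ t, y ≠ x ∧ ((t.count y : Int) = k)) := by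
  constructor
  · rintro ⟨w, hw, hc⟩
    by_cases hwx : w = x
    · subst hwx
      left
      rw [List.count_cons_self] at hc
      push_cast at hc ⊢
      omega
    · right
      refine ⟨w, ?_, hwx, ?_⟩
      · rcases List.mem_cons.mp hw with h | h
        · exact absurd h hwx
        · exact h
      · rwa [List.count_cons_of_ne (Ne.symm hwx)] at hc
  · rintro (h | ⟨y, hy, hne, hc⟩)
    · refine ⟨x, List.mem_cons_self, ?_⟩
      rw [List.count_cons_self]
      push_cast
      omega
    · refine ⟨y, List.mem_cons_of_mem _ hy, ?_⟩
      rwa [List.count_cons_of_ne (Ne.symm hne)]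

-- tail of Source B's loop once `prev` is a real value
def pvLoop (acc : Int × Int × Int) (run v : Int) : List Int → Int × Int × Int
  | [] => pvNote acc run
  | x :: t => if v = x then pvLoop acc (run + 1) v t else pvLoop (pvNote acc run) 1 x t

theorem foldl_stepB_eq_pvLoop (l : List Int) (acc : Int × Int × Int) (run v : Int) :
    (let st := l.foldl pvStepB (acc, run, some v); pvNote st.1 st.2.1) = pvLoop acc run v l := by
  induction l generalizing acc run v with
  | nil => simp [pvLoop]
  | cons x t ih =>
    by_cases h : v = x
    · simpa [pvLoop, pvStepB, h] using ih acc (run + 1) x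
    · simpa [pvLoop, pvStepB, h] using ih (pvNote acc run) 1 x

theorem pvLoop_spec (s : List Int) (hs : s.Pairwise (· ≤ ·)) (v : Int)
    (hv : ∀ x ∈ s, v ≤ x) (acc : Int × Int × Int) (run : Int) :
    pvLoop acc run v s =
      ((if run + (s.count v : Int) = 2 ∨ ∃ y ∈ s, y ≠ v ∧ ((s.count y : Int) = 2) then 1 else acc.1),
       (if run + (s.count v : Int) = 3 ∨ ∃ y ∈ s, y ≠ v ∧ ((s.count y : Int) = 3) then 1 else acc.2.1),
       (if run + (s.count v : Int) = 4 ∨ ∃ y ∈ s, y ≠ v ∧ ((s.count y : Int) = 4) then 1 else acc.2.2)) := by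
  induction s generalizing v acc run with
  | nil =>
    rcases acc with ⟨p, t3, q⟩
    simp only [pvLoop, pvNote_eq, List.count_nil, List.not_mem_nil, false_and, exists_false,
      or_false, Nat.cast_zero, add_zero]
  | cons x t ih =>
    rw [List.pairwise_cons] at hs
    obtain ⟨hx, ht⟩ := hs
    by_cases hvx : v = x
    · subst hvx
      have key : ∀ k : Int,
          (run + (((v :: t).count v : Int)) = k ∨ ∃ y ∈ v :: t, y ≠ v ∧ (((v :: t).count y : Int) = k)) ↔
          ((run + 1) + ((t.count v : Int)) = k ∨ ∃ y ∈ t, y ≠ v ∧ ((t.count y : Int) = k)) := by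
        intro k
        constructor
        · rintro (h | ⟨y, hy, hne, hc⟩)
          · left; rw [List.count_cons_self] at h; push_cast at h ⊢; omega
          · right
            refine ⟨y, ?_, hne, ?_⟩
            · rcases List.mem_cons.mp hy with h | h
              · exact absurd h hne
              · exact h
            · rwa [List.count_cons_of_ne (Ne.symm hne)] at hc
        · rintro (h | ⟨y, hy, hne, hc⟩)
          · left; rw [List.count_cons_self]; push_cast at h ⊢; omega
          · exact Or.inr ⟨y, List.mem_cons_of_mem _ hy, hne, by rwa [List.count_cons_of_ne (Ne.symm hne)]⟩
      rw [show pvLoop acc run v (v :: t) = pvLoop acc (run + 1) v t from by simp [pvLoop],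
        ih ht v hx acc (run + 1)]
      simp only [key]
    · have hvlt : v < x := lt_of_le_of_ne (hv x List.mem_cons_self) hvx
      have hvall : ∀ y ∈ x :: t, v < y := by
        intro y hy
        rcases List.mem_cons.mp hy with rfl | h
        · exact hvlt
        · exact lt_of_lt_of_le hvlt (hx y h)
      have hvnot : v ∉ x :: t := fun h => lt_irrefl v (hvall v h)
      have hcnt0 : (x :: t).count v = 0 := List.count_eq_zero.mpr hvnot
      have hP : ∀ k : Int,
          (run + (((x :: t).count v : Int)) = k ∨ ∃ y ∈ x :: t, y ≠ v ∧ (((x :: t).count y : Int) = k)) ↔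
          (run = k ∨ (1 + (t.count x : Int) = k ∨ ∃ y ∈ t, y ≠ x ∧ ((t.count y : Int) = k))) := by
        intro k
        rw [← exists_count_cons x t k, hcnt0]
        have hmem : (∃ y ∈ x :: t, y ≠ v ∧ (((x :: t).count y : Int) = k)) ↔
            (∃ y ∈ x :: t, (((x :: t).count y : Int) = k)) := by
          constructor
          · rintro ⟨y, hy, _, hc⟩; exact ⟨y, hy, hc⟩
          · rintro ⟨y, hy, hc⟩; exact ⟨y, hy, (hvall y hy).ne', hc⟩
        rw [hmem]
        push_cast
        constructor
        · rintro (h | h)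
          · left; omega
          · right; exact h
        · rintro (h | h)
          · left; omega
          · right; exact h
      rw [show pvLoop acc run v (x :: t) = pvLoop (pvNote acc run) 1 x t from by simp [pvLoop, hvx],
        ih ht x hx (pvNote acc run) 1, pvNote_eq]
      simp only [hP]
      rcases acc with ⟨p, t3, q⟩
      refine Prod.ext ?_ (Prod.ext ?_ ?_) <;> simp only
      · by_cases h1 : (1 + (t.count x : Int) = 2 ∨ ∃ y ∈ t, y ≠ x ∧ ((t.count y : Int) = 2)) <;>
          by_cases h2 : run = 2 <;> simp [h1, h2]
      · by_cases h1 : (1 + (t.count x : Int) = 3 ∨ ∃ y ∈ t, y ≠ x ∧ ((t.count y : Int) = 3)) <;>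
          by_cases h2 : run = 3 <;> simp [h1, h2]
      · by_cases h1 : (1 + (t.count x : Int) = 4 ∨ ∃ y ∈ t, y ≠ x ∧ ((t.count y : Int) = 4)) <;>
          by_cases h2 : run = 4 <;> simp [h1, h2]

theorem alt_eq_pvSpec (l : List Int) : rank_multiplicity_flags_py_alt l = pvSpec l := by
  unfold rank_multiplicity_flags_py_alt
  rcases hsrt : PySem.List.sorted l (fun x => x) false with _ | ⟨x, t⟩
  · have hl : l = [] := (PySem.List.sorted_eq_nil_iff l (fun x => x) false).mp hsrt
    subst hl
    simp [pvSpec, pvNote]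
  · have hperm : (x :: t).Perm l := hsrt ▸ PySem.List.sorted_perm (xs := l) (key := fun x => x) (rev := false)
    have hpw : (x :: t).Pairwise (· ≤ ·) := by
      have h := PySem.List.sorted_pairwise (xs := l) (key := fun x => x)
      rwa [hsrt] at h
    rw [List.pairwise_cons] at hpw
    obtain ⟨hx, ht⟩ := hpw
    have hstep : pvStepB ((0, 0, 0), 0, none) x = ((0, 0, 0), 1, some x) := by
      simp [pvStepB, pvNote]
    rw [List.foldl_cons, hstep]
    have hloop := foldl_stepB_eq_pvLoop t (0, 0, 0) 1 x
    simp only at hloop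
    rw [hloop, pvLoop_spec t ht x hx (0, 0, 0) 1]
    have hk : ∀ k : Int, (∃ v ∈ l, ((l.count v : Int) = k)) ↔
        (1 + (t.count x : Int) = k ∨ ∃ y ∈ t, y ≠ x ∧ ((t.count y : Int) = k)) := by
      intro k
      rw [← exists_count_cons x t k]
      constructor
      · rintro ⟨v, hv, hc⟩
        exact ⟨v, hperm.mem_iff.mpr hv, by rwa [hperm.count_eq v]⟩
      · rintro ⟨v, hv, hc⟩
        exact ⟨v, hperm.mem_iff.mp hv, by rwa [hperm.count_eq v] at hc⟩
    simp only [pvSpec, hk]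

theorem a_eq_pvSpec (l : List Int) : rank_multiplicity_flags_py l = pvSpec l := by
  unfold rank_multiplicity_flags_py
  rw [PySem.Dict.foldl_insert_getD_add_one_eq_counter]
  have hval : (PySem.Dict.counter l).values = (PySem.Set.ofList l).map (fun k => (l.count k : Int)) := by
    simp [PySem.Dict.values, PySem.Dict.items_counter, List.map_map, Function.comp]
  have hany : ∀ k : Int,
      ((PySem.List.sorted (PySem.Dict.counter l).values (fun c => c) true).any (fun c => c == k) = true) ↔
      (∃ v ∈ l, ((l.count v : Int) = k)) := by
    intro k
    rw [List.any_eq_true]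
    constructor
    · rintro ⟨c, hc, hck⟩
      rw [PySem.List.mem_sorted, hval, List.mem_map] at hc
      obtain ⟨v, hv, hvc⟩ := hc
      exact ⟨v, (PySem.Set.mem_ofList l v).mp hv, by rw [hvc]; exact (beq_iff_eq.mp hck)⟩
    · rintro ⟨v, hv, hc⟩
      refine ⟨(l.count v : Int), ?_, by simpa using hc⟩
      rw [PySem.List.mem_sorted, hval, List.mem_map]
      exact ⟨v, (PySem.Set.mem_ofList l v).mpr hv, rfl⟩
  simp only [pvSpec, hany]

-- ===== VERDICT (by name: the statement is the Claim_ definition above) =====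
theorem rank_multiplicity_flags_py_spec : Claim_equal_rank_multiplicity_flags_py := by
  intro ranks _
  unfold Spec_rank_multiplicity_flags_py
  rw [a_eq_pvSpec, alt_eq_pvSpec]
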